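-- pv_equiv track=rewrite | github.com/ZrjaK/algorithm | OJ/leetcode/2317.操作后的最大异或和.py | maximumXOR
-- ===== SOURCE A (Python) =====
-- from typing import List
--
-- def maximumXOR(nums: List[int]) -> int:
--     a = 0
--     for i in nums:
--         a ^= i
--     d = [0] * 32
--     for i in nums:
--         for j in range(32):
--             if i & (1<<j):
--                 d[j] += 1
--     for j in range(32):
--         if d[j] and not a & (1<<j):
--             a ^= 1<<j
--     return a
-- ===== SOURCE B (Python) =====
-- from typing import List
--
-- def maximumXOR(nums: List[int]) -> int:
--     # single pass: running xor and running OR of each value's low 32 bits,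
--     # combined at the end (the original patches the xor bit-by-bit from a count table)
--     x = 0
--     m = 0
--     for n in nums:
--         x ^= n
--         m |= n & 0xFFFFFFFF
--     return x | m
-- ===== Notes on version B (the rewrite author's own statement) =====
-- stated objective: faster
-- what changed: Replaces the three passes (xor fold, 32-entry bit-count table filled by a nested 32-bit loop, then a 32-bit patch loop) with a single pass that keeps a running xor and a running OR of each element's low 32 bits and returns their bitwise OR.
import Mathlib
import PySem

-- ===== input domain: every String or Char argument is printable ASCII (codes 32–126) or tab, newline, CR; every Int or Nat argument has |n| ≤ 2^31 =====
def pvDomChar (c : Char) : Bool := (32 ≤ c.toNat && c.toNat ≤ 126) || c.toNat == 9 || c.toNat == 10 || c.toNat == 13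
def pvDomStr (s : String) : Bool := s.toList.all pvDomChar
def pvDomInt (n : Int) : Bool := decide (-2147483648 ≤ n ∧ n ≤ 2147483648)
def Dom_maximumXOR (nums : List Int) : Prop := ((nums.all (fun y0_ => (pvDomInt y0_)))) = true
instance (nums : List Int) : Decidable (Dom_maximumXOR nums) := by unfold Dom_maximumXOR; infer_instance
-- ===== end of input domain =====

-- B replaces A's three passes (xor fold, 32-entry bit-count table filled by a nested 32-bit loop,
-- then a 32-bit patch loop) with one pass keeping a running xor and a running OR of each element's
-- low 32 bits, combined at the end; equal on every input (objective: simpler).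

-- ===== PORT A =====
-- `a ^= i` → Int.xor, `i & (1<<j)` → Int.land/`<<<` (two's complement, exact for negatives);
-- `d[j]` is always in range (0 ≤ j < 32 = len(d)), so List.getD is exact here.
def maximumXOR (nums : List Int) : Int :=
  let a := nums.foldl (fun a i => Int.xor a i) 0
  let d := List.replicate 32 (0 : Int)
  let d := nums.foldl (fun d i =>
      (PySem.List.pyRange 0 32 1).foldl (fun d j =>
        if Int.land i ((1 : Int) <<< j) ≠ 0 then
          d.set j.toNat (d.getD j.toNat 0 + 1)
        else d) d) d
  (PySem.List.pyRange 0 32 1).foldl (fun a j =>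
    if d.getD j.toNat 0 ≠ 0 ∧ Int.land a ((1 : Int) <<< j) = 0 then
      Int.xor a ((1 : Int) <<< j)
    else a) a

-- ===== PORT B =====
def maximumXOR_alt (nums : List Int) : Int :=
  let p := nums.foldl
    (fun (p : Int × Int) n => (Int.xor p.1 n, Int.lor p.2 (Int.land n 4294967295)))
    ((0 : Int), (0 : Int))
  Int.lor p.1 p.2


-- ===== PRECONDITION & SPEC =====
def Spec_maximumXOR (nums : List Int) (out : Int) : Prop := out = maximumXOR_alt nums
instance (nums : List Int) (out : Int) : Decidable (Spec_maximumXOR nums out) := by unfold Spec_maximumXOR; infer_instance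

-- ===== CLAIM (what is proved, stated in full; the proofs are below) =====
def Claim_equal_maximumXOR : Prop := ∀ (nums : List Int), Dom_maximumXOR nums → Spec_maximumXOR nums (maximumXOR nums)

-- ===== LEMMAS AND PROOFS =====

theorem pvIntExt {m n : Int} (h : ∀ k, m.testBit k = n.testBit k) : m = n := by
  cases m with
  | ofNat a =>
    cases n with
    | ofNat b => exact congrArg Int.ofNat (Nat.eq_of_testBit_eq (fun i => h i))
    | negSucc b =>
      exfalso
      have ha : a.testBit (a + b) = false :=
        Nat.testBit_eq_false_of_lt (lt_of_lt_of_le Nat.lt_two_pow_self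
          (Nat.pow_le_pow_right (by norm_num) (Nat.le_add_right a b)))
      have hb : b.testBit (a + b) = false :=
        Nat.testBit_eq_false_of_lt (lt_of_lt_of_le Nat.lt_two_pow_self
          (Nat.pow_le_pow_right (by norm_num) (Nat.le_add_left b a)))
      have := h (a + b)
      simp [Int.testBit, ha, hb] at this
  | negSucc a =>
    cases n with
    | ofNat b =>
      exfalso
      have ha : a.testBit (a + b) = false :=
        Nat.testBit_eq_false_of_lt (lt_of_lt_of_le Nat.lt_two_pow_self
          (Nat.pow_le_pow_right (by norm_num) (Nat.le_add_right a b)))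
      have hb : b.testBit (a + b) = false :=
        Nat.testBit_eq_false_of_lt (lt_of_lt_of_le Nat.lt_two_pow_self
          (Nat.pow_le_pow_right (by norm_num) (Nat.le_add_left b a)))
      have := h (a + b)
      simp [Int.testBit, ha, hb] at this
    | negSucc b =>
      have : a = b := Nat.eq_of_testBit_eq (fun i => by
        have := h i
        simpa [Int.testBit] using this)
      simp [this]

theorem pvTbNatCast (m k : Nat) : Int.testBit ((m : Nat) : Int) k = m.testBit k := rfl

theorem pvTbZero (k : Nat) : Int.testBit 0 k = false := by
  simp [Int.testBit]

theorem pvTbPow (j k : Nat) : Int.testBit (((2 ^ j : Nat) : Int)) k = decide (j = k) := by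
  rw [pvTbNatCast, Nat.testBit_two_pow]

theorem pvLandPow (a : Int) (j : Nat) :
    Int.land a ((2 ^ j : Nat) : Int) = if a.testBit j then ((2 ^ j : Nat) : Int) else 0 := by
  apply pvIntExt
  intro k
  by_cases hb : a.testBit j
  · rw [if_pos hb, Int.testBit_land, pvTbPow]
    by_cases hjk : j = k
    · subst hjk; simp [hb]
    · simp [hjk]
  · rw [if_neg hb, Int.testBit_land, pvTbPow, pvTbZero]
    by_cases hjk : j = k
    · subst hjk; simp [hb]
    · simp [hjk]

theorem pvLandPowNe (a : Int) (j : Nat) :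
    (Int.land a ((2 ^ j : Nat) : Int) ≠ 0) ↔ a.testBit j = true := by
  rw [pvLandPow]
  by_cases hb : a.testBit j
  · rw [if_pos hb]
    exact ⟨fun _ => hb, fun _ => by positivity⟩
  · simp [hb]

theorem pvTbXorPow (a : Int) (j k : Nat) :
    (Int.xor a ((2 ^ j : Nat) : Int)).testBit k =
      if j = k then !(a.testBit k) else a.testBit k := by
  rw [Int.testBit_lxor, pvTbPow]
  by_cases hjk : j = k <;> simp [hjk]

theorem pvTbMask (n : Int) (k : Nat) :
    (Int.land n 4294967295).testBit k = (n.testBit k && decide (k < 32)) := by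
  have h : (4294967295 : Int) = ((2 ^ 32 - 1 : Nat) : Int) := by norm_num
  rw [h, Int.testBit_land, pvTbNatCast, Nat.testBit_two_pow_sub_one]

theorem pvPairFold (nums : List Int) (x m : Int) :
    nums.foldl (fun (p : Int × Int) n => (Int.xor p.1 n, Int.lor p.2 (Int.land n 4294967295))) (x, m)
      = (nums.foldl (fun a i => Int.xor a i) x,
         nums.foldl (fun m n => Int.lor m (Int.land n 4294967295)) m) := by
  induction nums generalizing x m with
  | nil => rfl
  | cons n t ih => simp only [List.foldl_cons]; exact ih _ _

theorem pvMBits (nums : List Int) (m : Int) (k : Nat) :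
    (nums.foldl (fun m n => Int.lor m (Int.land n 4294967295)) m).testBit k
      = (m.testBit k || decide (k < 32 ∧ ∃ n ∈ nums, n.testBit k = true)) := by
  induction nums generalizing m with
  | nil => simp
  | cons n t ih =>
    simp only [List.foldl_cons]
    rw [ih, Int.testBit_lor, pvTbMask]
    by_cases hk : k < 32
    · simp only [hk, decide_true, Bool.and_true, true_and]
      by_cases hn : n.testBit k <;> simp [hn]
    · simp [hk]

theorem pvRange32 : PySem.List.pyRange 0 32 1 = (List.range 32).map (fun n : Nat => (n : Int)) := by
  decide

theorem pvSetGetD (d : List Int) (j k : Nat) (v : Int) :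
    (d.set j v).getD k 0 = if j = k ∧ j < d.length then v else d.getD k 0 := by
  rw [List.getD_eq_getElem?_getD, List.getD_eq_getElem?_getD, List.getElem?_set]
  by_cases hjk : j = k
  · subst hjk
    by_cases hj : j < d.length <;> simp [hj]
  · simp [hjk]

theorem pvInnerLen (L : List Nat) (d : List Int) (i : Int) :
    (L.foldl (fun d j => if Int.land i ((2 ^ j : Nat) : Int) ≠ 0 then d.set j (d.getD j 0 + 1) else d) d).length
      = d.length := by
  induction L generalizing d with
  | nil => rfl
  | cons j t ih =>
    simp only [List.foldl_cons]
    by_cases h : Int.land i ((2 ^ j : Nat) : Int) ≠ 0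
    · rw [if_pos h, ih, List.length_set]
    · rw [if_neg h, ih]

theorem pvInnerGetD (L : List Nat) (d : List Int) (i : Int) (k : Nat)
    (hnd : L.Nodup) (hL : ∀ j ∈ L, j < d.length) :
    (L.foldl (fun d j => if Int.land i ((2 ^ j : Nat) : Int) ≠ 0 then d.set j (d.getD j 0 + 1) else d) d).getD k 0
      = d.getD k 0 + (if k ∈ L ∧ Int.land i ((2 ^ k : Nat) : Int) ≠ 0 then 1 else 0) := by
  induction L generalizing d with
  | nil => simp
  | cons j t ih =>
    simp only [List.foldl_cons]
    have hjd : j < d.length := hL j (by simp)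
    have hnd' : t.Nodup := (List.nodup_cons.mp hnd).2
    have hjt : j ∉ t := (List.nodup_cons.mp hnd).1
    by_cases hc : Int.land i ((2 ^ j : Nat) : Int) ≠ 0
    · rw [if_pos hc]
      rw [ih (d.set j (d.getD j 0 + 1)) hnd'
          (by intro x hx; rw [List.length_set]; exact hL x (by simp [hx]))]
      rw [pvSetGetD]
      by_cases hjk : j = k
      · subst hjk
        have hkt : ¬ (j ∈ t ∧ Int.land i ((2 ^ j : Nat) : Int) ≠ 0) := fun h => hjt h.1
        rw [if_pos ⟨rfl, hjd⟩, if_neg hkt, if_pos ⟨by simp, hc⟩]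
        ring
      · rw [if_neg (fun h => hjk h.1)]
        by_cases hkt : k ∈ t ∧ Int.land i ((2 ^ k : Nat) : Int) ≠ 0
        · rw [if_pos hkt, if_pos ⟨List.mem_cons_of_mem _ hkt.1, hkt.2⟩]
        · rw [if_neg hkt, if_neg (fun h => hkt ⟨(List.mem_cons.mp h.1).resolve_left (fun e => hjk e.symm), h.2⟩)]
    · rw [if_neg hc]
      rw [ih d hnd' (fun x hx => hL x (by simp [hx]))]
      by_cases hjk : j = k
      · subst hjk
        rw [if_neg (fun h => hjt h.1), if_neg (fun h => hc h.2)]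
      · by_cases hkt : k ∈ t ∧ Int.land i ((2 ^ k : Nat) : Int) ≠ 0
        · rw [if_pos hkt, if_pos ⟨List.mem_cons_of_mem _ hkt.1, hkt.2⟩]
        · rw [if_neg hkt, if_neg (fun h => hkt ⟨(List.mem_cons.mp h.1).resolve_left (fun e => hjk e.symm), h.2⟩)]

theorem pvOuterGetD (nums : List Int) (d : List Int) (k : Nat)
    (hk : k < 32) (hlen : d.length = 32) :
    (nums.foldl (fun d i =>
        (List.range 32).foldl (fun d j => if Int.land i ((2 ^ j : Nat) : Int) ≠ 0 then d.set j (d.getD j 0 + 1) else d) d) d).getD k 0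
      = d.getD k 0 + ((nums.countP (fun n => decide (Int.land n ((2 ^ k : Nat) : Int) ≠ 0)) : Nat) : Int) := by
  induction nums generalizing d with
  | nil => simp
  | cons n t ih =>
    simp only [List.foldl_cons]
    have hlen' : ((List.range 32).foldl (fun d j => if Int.land n ((2 ^ j : Nat) : Int) ≠ 0 then d.set j (d.getD j 0 + 1) else d) d).length = 32 := by
      rw [pvInnerLen]; exact hlen
    rw [ih _ hlen']
    rw [pvInnerGetD _ _ _ _ List.nodup_range (fun j hj => by rw [hlen]; exact List.mem_range.mp hj)]
    rw [List.countP_cons]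
    have hkmem : k ∈ List.range 32 := List.mem_range.mpr hk
    by_cases hc : Int.land n ((2 ^ k : Nat) : Int) ≠ 0
    · rw [if_pos ⟨hkmem, hc⟩]
      have hdec : (decide (Int.land n ((2 ^ k : Nat) : Int) ≠ 0)) = true := by
        rw [decide_eq_true_eq]; exact hc
      rw [hdec, if_pos rfl]
      push_cast
      ring
    · rw [if_neg (fun h => hc h.2)]
      have hdec : (decide (Int.land n ((2 ^ k : Nat) : Int) ≠ 0)) = false := by
        rw [decide_eq_false_iff_not]; exact hc
      rw [hdec]
      push_cast
      ring

theorem pvPatchBits (L : List Nat) (d : List Int) (a : Int) (k : Nat) :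
    (L.foldl (fun a j =>
        if d.getD j 0 ≠ 0 ∧ Int.land a ((2 ^ j : Nat) : Int) = 0 then Int.xor a ((2 ^ j : Nat) : Int) else a) a).testBit k
      = (a.testBit k || decide (k ∈ L ∧ d.getD k 0 ≠ 0)) := by
  induction L generalizing a with
  | nil => simp
  | cons j t ih =>
    simp only [List.foldl_cons]
    rw [ih]
    have hstep : (if d.getD j 0 ≠ 0 ∧ Int.land a ((2 ^ j : Nat) : Int) = 0 then Int.xor a ((2 ^ j : Nat) : Int) else a).testBit k
        = (a.testBit k || decide (k = j ∧ d.getD k 0 ≠ 0)) := by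
      by_cases hc : d.getD j 0 ≠ 0 ∧ Int.land a ((2 ^ j : Nat) : Int) = 0
      · rw [if_pos hc, pvTbXorPow]
        by_cases hjk : j = k
        · subst hjk
          have hf : a.testBit j = false := by
            cases hb : a.testBit j
            · rfl
            · exact absurd hc.2 ((pvLandPowNe a j).mpr hb)
          have hdec : decide (j = j ∧ d.getD j 0 ≠ 0) = true := by
            rw [decide_eq_true_eq]; exact ⟨rfl, hc.1⟩
          rw [if_pos rfl, hf, hdec]
          rfl
        · rw [if_neg hjk]
          have hdec : decide (k = j ∧ d.getD k 0 ≠ 0) = false := by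
            rw [decide_eq_false_iff_not]; exact fun h => hjk h.1.symm
          rw [hdec]
          simp
      · rw [if_neg hc]
        by_cases hkj : k = j
        · subst hkj
          by_cases hd : d.getD k 0 ≠ 0
          · have hl : Int.land a ((2 ^ k : Nat) : Int) ≠ 0 := fun h0 => hc ⟨hd, h0⟩
            have hT : a.testBit k = true := (pvLandPowNe a k).mp hl
            rw [hT]
            rfl
          · have hdec : decide (k = k ∧ d.getD k 0 ≠ 0) = false := by
              rw [decide_eq_false_iff_not]; exact fun h => hd h.2
            rw [hdec]
            simp
        · have hdec : decide (k = j ∧ d.getD k 0 ≠ 0) = false := by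
            rw [decide_eq_false_iff_not]; exact fun h => hkj h.1
          rw [hdec]
          simp
    rw [hstep, Bool.or_assoc]
    congr 1
    by_cases h1 : k = j <;> by_cases h2 : k ∈ t <;> by_cases hd : d.getD k 0 ≠ 0 <;>
      simp [h1, h2, List.mem_cons]

theorem pvInnerBridge (d : List Int) (i : Int) :
    (PySem.List.pyRange 0 32 1).foldl (fun d j =>
        if Int.land i ((1 : Int) <<< j) ≠ 0 then d.set j.toNat (d.getD j.toNat 0 + 1) else d) d
      = (List.range 32).foldl (fun d j => if Int.land i ((2 ^ j : Nat) : Int) ≠ 0 then d.set j (d.getD j 0 + 1) else d) d := by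
  rw [pvRange32, List.foldl_map]
  congr 1
  funext d j
  rw [Int.toNat_natCast, Int.one_shiftLeft]

theorem pvPatchBridge (d : List Int) (a : Int) :
    (PySem.List.pyRange 0 32 1).foldl (fun a j =>
        if d.getD j.toNat 0 ≠ 0 ∧ Int.land a ((1 : Int) <<< j) = 0 then Int.xor a ((1 : Int) <<< j) else a) a
      = (List.range 32).foldl (fun a j =>
        if d.getD j 0 ≠ 0 ∧ Int.land a ((2 ^ j : Nat) : Int) = 0 then Int.xor a ((2 ^ j : Nat) : Int) else a) a := by
  rw [pvRange32, List.foldl_map]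
  congr 1
  funext a j
  rw [Int.toNat_natCast, Int.one_shiftLeft]
theorem pvGetDReplicate (k : Nat) : (List.replicate 32 (0 : Int)).getD k 0 = 0 := by
  rw [List.getD_eq_getElem?_getD, List.getElem?_replicate]
  split <;> rfl

set_option maxHeartbeats 2000000 in
theorem pvMain (nums : List Int) : maximumXOR nums = maximumXOR_alt nums := by
  simp only [maximumXOR, maximumXOR_alt]
  rw [pvPairFold]
  rw [pvPatchBridge]
  rw [show (fun (d : List Int) (i : Int) =>
      (PySem.List.pyRange 0 32 1).foldl (fun d j =>
        if Int.land i ((1 : Int) <<< j) ≠ 0 then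
          d.set j.toNat (d.getD j.toNat 0 + 1)
        else d) d)
      = (fun (d : List Int) (i : Int) =>
      (List.range 32).foldl (fun d j =>
        if Int.land i ((2 ^ j : Nat) : Int) ≠ 0 then d.set j (d.getD j 0 + 1) else d) d)
    from funext fun d => funext fun i => pvInnerBridge d i]
  apply pvIntExt
  intro k
  rw [pvPatchBits, Int.testBit_lor, pvMBits, pvTbZero, Bool.false_or]
  congr 1
  rw [decide_eq_decide]
  by_cases hk : k < 32
  · have hmem : k ∈ List.range 32 := List.mem_range.mpr hk
    rw [pvOuterGetD nums _ k hk (by simp)]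
    rw [pvGetDReplicate, zero_add]
    constructor
    · intro ⟨_, hcnt⟩
      refine ⟨hk, ?_⟩
      have : nums.countP (fun n => decide (Int.land n ((2 ^ k : Nat) : Int) ≠ 0)) ≠ 0 := by
        intro h0; rw [h0] at hcnt; simp at hcnt
      obtain ⟨n, hn, hp⟩ := List.countP_pos_iff.mp (Nat.pos_of_ne_zero this)
      exact ⟨n, hn, (pvLandPowNe n k).mp (of_decide_eq_true hp)⟩
    · intro ⟨_, n, hn, hb⟩
      refine ⟨hmem, ?_⟩
      have hpos : 0 < nums.countP (fun n => decide (Int.land n ((2 ^ k : Nat) : Int) ≠ 0)) :=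
        List.countP_pos_iff.mpr ⟨n, hn, decide_eq_true ((pvLandPowNe n k).mpr hb)⟩
      have : (0:Int) < ((nums.countP (fun n => decide (Int.land n ((2 ^ k : Nat) : Int) ≠ 0)) : Nat) : Int) := by
        exact_mod_cast hpos
      omega
  · constructor
    · intro ⟨hmem, _⟩
      exact absurd (List.mem_range.mp hmem) hk
    · intro ⟨h32, _⟩
      exact absurd h32 hk

-- ===== VERDICT (by name: the statement is the Claim_ definition above) =====
theorem maximumXOR_spec : Claim_equal_maximumXOR := by
  intro nums _
  exact pvMain nums
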